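-- pv_equiv track=rewrite | github.com/alirezatabatabaeian/Star-Alignment | src/Star_Alignment.py | score
-- ===== SOURCE A (Python) =====
-- def score(sequences):
--   score_value = int(0)
--   for i in range(0, len(sequences)-1):
--     for j in range(i+1, len(sequences)):
--       for k in range(0, len(sequences[0])):
--         if (sequences[i][k] == "-") and (sequences[j][k] == "-"):
--           score_value += 0
--         elif (sequences[i][k] == "-") or (sequences[j][k] == "-"):
--           score_value += -2
--         elif sequences[i][k] == sequences[j][k] :
--           score_value += 3
--         else :
--           score_value += -1
--   return int(score_value)
-- ===== SOURCE B (Python) =====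
-- def score(sequences):
--     n = len(sequences)
--     if n < 2:
--         return 0
--     total = 0
--     for k in range(len(sequences[0])):
--         counts = {}
--         g = 0
--         ng = 0
--         for s in sequences:
--             c = s[k]
--             if c == "-":
--                 total += -2 * ng
--                 g += 1
--             else:
--                 v = counts.get(c, 0)
--                 total += -2 * g + 3 * v - (ng - v)
--                 counts[c] = v + 1
--                 ng += 1
--     return total
-- ===== Notes on version B (the rewrite author's own statement) =====
-- stated objective: faster
-- what changed: Per-column single pass with running character counts (each new char's pair contributions computed combinatorially from counts of earlier chars) replaces the O(n^2) all-pairs loop.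
import Mathlib
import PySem

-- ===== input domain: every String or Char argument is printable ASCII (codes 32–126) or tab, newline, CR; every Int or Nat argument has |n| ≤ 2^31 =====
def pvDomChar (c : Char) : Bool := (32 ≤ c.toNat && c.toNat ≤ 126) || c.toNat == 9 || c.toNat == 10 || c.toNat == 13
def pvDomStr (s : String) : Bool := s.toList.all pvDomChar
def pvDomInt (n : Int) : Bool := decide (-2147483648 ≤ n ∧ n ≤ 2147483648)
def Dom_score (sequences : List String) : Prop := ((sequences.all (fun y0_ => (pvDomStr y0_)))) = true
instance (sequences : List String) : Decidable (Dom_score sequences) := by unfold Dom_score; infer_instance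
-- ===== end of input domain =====

-- B replaces A's all-pairs scan by a per-column single pass with running character counts
-- (each new char's pair contributions computed from counts of earlier chars) — measured faster.


-- ===== PORT A =====
def score (sequences : List String) : Int :=
  (PySem.List.pyRange 0 ((sequences.length : Int) - 1) 1).foldl (fun sv i =>
    (PySem.List.pyRange (i + 1) (sequences.length : Int) 1).foldl (fun sv j =>
      (PySem.List.pyRange 0 (PySem.Str.len (PySem.List.pyGetD sequences 0 "")) 1).foldl (fun sv k =>
        let ci := (PySem.Str.pyGet? (PySem.List.pyGetD sequences i "") k).getD ' '
        let cj := (PySem.Str.pyGet? (PySem.List.pyGetD sequences j "") k).getD ' '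
        if ci = '-' ∧ cj = '-' then sv + 0
        else if ci = '-' ∨ cj = '-' then sv + (-2)
        else if ci = cj then sv + 3
        else sv + (-1)) sv) sv) 0

-- ===== PORT B =====
def score_alt (sequences : List String) : Int :=
  if sequences.length < 2 then 0
  else
    (PySem.List.pyRange 0 (PySem.Str.len (PySem.List.pyGetD sequences 0 "")) 1).foldl
      (fun total k =>
        (sequences.foldl
          (fun (st : PySem.Dict Char Int × Int × Int × Int) s =>
            let c := (PySem.Str.pyGet? s k).getD ' '
            if c = '-' then (st.1, st.2.1 + 1, st.2.2.1, st.2.2.2 + (-2) * st.2.2.1)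
            else
              let v := st.1.getD c 0
              (st.1.insert c (v + 1), st.2.1, st.2.2.1 + 1,
               st.2.2.2 + (-2) * st.2.1 + 3 * v - (st.2.2.1 - v)))
          (PySem.Dict.empty, 0, 0, total)).2.2.2)
      0

-- ===== PRECONDITION & SPEC =====
-- Pre_ excludes exactly the inputs where Python A raises IndexError: with at least two
-- sequences, every column index k < len(sequences[0]) is read from every sequence, so
-- every sequence must be at least as long as the first one.
def Pre_score (sequences : List String) : Prop :=
  ∀ s ∈ sequences, PySem.Str.len (sequences.headD "") ≤ PySem.Str.len s
instance (sequences : List String) : Decidable (Pre_score sequences) := by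
  unfold Pre_score; infer_instance

def pvWitness_score : List String := ["AB-", "A-C"]

def Spec_score (sequences : List String) (out : Int) : Prop := out = score_alt sequences
instance (sequences : List String) (out : Int) : Decidable (Spec_score sequences out) := by
  unfold Spec_score; infer_instance

-- ===== CLAIM (what is proved, stated in full; the proofs are below) =====
def Claim_equal_score : Prop := ∀ (sequences : List String), Dom_score sequences →
  Pre_score sequences → Spec_score sequences (score sequences)

-- ===== LEMMAS AND PROOFS =====

def pvF (a b : Char) : Int :=
  if a = '-' ∧ b = '-' then 0
  else if a = '-' ∨ b = '-' then -2
  else if a = b then 3 else -1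

def pvPairSum : List Char → Int
  | [] => 0
  | c :: rest => (rest.map (pvF c)).sum + pvPairSum rest

def pvCross (p cs : List Char) : Int :=
  (cs.map (fun c => (p.map (fun a => pvF a c)).sum)).sum

def pvT : List Char → List Char → Int
  | _, [] => 0
  | p, c :: rest =>
    (if c = '-' then (-2) * ((p.filter (fun a => ¬ a = '-')).length : Int)
     else (-2) * (p.count '-' : Int) + 3 * (p.count c : Int) -
          (((p.filter (fun a => ¬ a = '-')).length : Int) - (p.count c : Int)))
    + pvT (p ++ [c]) rest

theorem pv_w_gap (p : List Char) :
    (p.map (fun a => pvF a '-')).sum = (-2) * ((p.filter (fun a => ¬ a = '-')).length : Int) := by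
  induction p with
  | nil => simp
  | cons a t ih =>
    rw [List.map_cons, List.sum_cons, ih]
    by_cases h : a = '-' <;> simp [pvF, h, List.filter_cons] <;> push_cast <;> ring

theorem pv_w_nongap (p : List Char) (c : Char) (hc : ¬ c = '-') :
    (p.map (fun a => pvF a c)).sum
      = (-2) * (p.count '-' : Int) + 3 * (p.count c : Int) -
        (((p.filter (fun a => ¬ a = '-')).length : Int) - (p.count c : Int)) := by
  induction p with
  | nil => simp
  | cons a t ih =>
    rw [List.map_cons, List.sum_cons, ih]
    by_cases h1 : a = '-'
    · subst h1
      simp [pvF, Ne.symm hc, hc, List.count_cons, List.filter_cons]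
      push_cast; ring
    · by_cases h2 : a = c
      · subst h2
        simp [pvF, h1, hc, List.count_cons, List.filter_cons]
        push_cast; ring
      · simp [pvF, h1, h2, hc, Ne.symm h2, List.count_cons, List.filter_cons]
        push_cast; ring

theorem pvT_eq (cs : List Char) : ∀ p, pvT p cs = pvCross p cs + pvPairSum cs := by
  induction cs with
  | nil => intro p; simp [pvT, pvCross, pvPairSum]
  | cons c rest ih =>
    intro p
    rw [pvT, ih (p ++ [c])]
    have hcross : pvCross (p ++ [c]) rest
        = pvCross p rest + (rest.map (pvF c)).sum := by
      unfold pvCross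
      rw [show (rest.map (fun c' => ((p ++ [c]).map (fun a => pvF a c')).sum))
            = rest.map (fun c' => (p.map (fun a => pvF a c')).sum + pvF c c') from
          List.map_congr_left (by intro x _; simp)]
      rw [PySem.List.sum_map_add_int]
    have hhead : (if c = '-' then (-2) * ((p.filter (fun a => ¬ a = '-')).length : Int)
        else (-2) * (p.count '-' : Int) + 3 * (p.count c : Int) -
          (((p.filter (fun a => ¬ a = '-')).length : Int) - (p.count c : Int)))
        = (p.map (fun a => pvF a c)).sum := by
      by_cases h : c = '-'
      · subst h; simp [pv_w_gap]
      · simp [h, pv_w_nongap p c h]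
    have hcr : pvCross p (c :: rest) = (p.map (fun a => pvF a c)).sum + pvCross p rest := by
      simp [pvCross]
    rw [hcross, hhead, hcr, pvPairSum]
    ring

theorem pv_bfold (cs : List Char) :
    ∀ (p : List Char) (d : PySem.Dict Char Int) (g ng total : Int),
    (∀ c, ¬ c = '-' → d.getD c 0 = (p.count c : Int)) →
    g = (p.count '-' : Int) →
    ng = ((p.filter (fun a => ¬ a = '-')).length : Int) →
    (cs.foldl
      (fun (st : PySem.Dict Char Int × Int × Int × Int) c =>
        if c = '-' then (st.1, st.2.1 + 1, st.2.2.1, st.2.2.2 + (-2) * st.2.2.1)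
        else
          let v := st.1.getD c 0
          (st.1.insert c (v + 1), st.2.1, st.2.2.1 + 1,
           st.2.2.2 + (-2) * st.2.1 + 3 * v - (st.2.2.1 - v)))
      (d, g, ng, total)).2.2.2 = total + pvT p cs := by
  induction cs with
  | nil => intro p d g ng total _ _ _; simp [pvT]
  | cons c rest ih =>
    intro p d g ng total hd hg hng
    by_cases h : c = '-'
    · subst h
      rw [List.foldl_cons, if_pos rfl]
      rw [ih (p ++ ['-']) d (g + 1) ng (total + (-2) * ng)
        (by intro c' hc'; rw [hd c' hc']
            simp [List.count_append, List.count_singleton, Ne.symm hc'])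
        (by rw [hg]; simp [List.count_append])
        (by rw [hng]; simp [List.filter_append])]
      rw [pvT, if_pos rfl, hng]; ring
    · rw [List.foldl_cons, if_neg h]
      rw [ih (p ++ [c]) (d.insert c (d.getD c 0 + 1)) g (ng + 1)
          (total + (-2) * g + 3 * (d.getD c 0) - (ng - d.getD c 0))
        (by
          intro c' hc'
          rw [PySem.Dict.getD_insert]
          by_cases hcc : c' = c
          · subst hcc; rw [if_pos rfl, hd c' hc']
            simp [List.count_append]
          · rw [if_neg hcc, hd c' hc']
            simp [List.count_append, List.count_singleton, Ne.symm hcc])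
        (by rw [hg]; simp [List.count_append, List.count_singleton, h])
        (by rw [hng]; simp [List.filter_append, h])]
      rw [pvT, if_neg h, hd c h, hng, hg]; ring

def pvCh (s : String) (k : Int) : Char := (PySem.Str.pyGet? s k).getD ' '

def pvCol (sequences : List String) (k : Int) : List Char :=
  sequences.map (fun s => pvCh s k)

theorem pvCh_empty (k : Int) : pvCh "" k = ' ' := by
  simp [pvCh, PySem.Str.pyGet?, PySem.Chars.pyGet?, PySem.List.pyGet?]

theorem pv_sum_drop_pairSum (cs : List Char) :
    ((List.range cs.length).map
      (fun m => ((cs.drop (m + 1)).map (pvF (cs.getD m ' '))).sum)).sum = pvPairSum cs := by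
  induction cs with
  | nil => simp [pvPairSum]
  | cons c rest ih =>
    rw [show (c :: rest).length = rest.length + 1 from rfl, List.range_succ_eq_map,
        List.map_cons, List.sum_cons, List.map_map]
    rw [show ((fun m => ((List.drop (m + 1) (c :: rest)).map
          (pvF ((c :: rest).getD m ' '))).sum) ∘ Nat.succ)
        = (fun m => ((rest.drop (m + 1)).map (pvF (rest.getD m ' '))).sum) from
      funext (fun m => by simp [Function.comp, List.getD_cons_succ])]
    rw [ih]
    simp [pvPairSum]

theorem pv_cross_nil (cs : List Char) : pvCross [] cs = 0 := by
  simp [pvCross]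

theorem pv_colA (sequences : List String) (k : Int) (h2 : 2 ≤ sequences.length) :
    ((PySem.List.pyRange 0 ((sequences.length : Int) - 1) 1).map (fun i =>
      ((PySem.List.pyRange (i + 1) (sequences.length : Int) 1).map (fun j =>
        pvF (pvCh (PySem.List.pyGetD sequences i "") k)
            (pvCh (PySem.List.pyGetD sequences j "") k))).sum)).sum
    = pvPairSum (pvCol sequences k) := by
  have hlen : (pvCol sequences k).length = sequences.length := by simp [pvCol]
  have hch : ∀ (i : Int), pvCh (PySem.List.pyGetD sequences i "") k
      = PySem.List.pyGetD (pvCol sequences k) i ' ' := by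
    intro i
    unfold pvCol
    rw [show (' ' : Char) = pvCh "" k from (pvCh_empty k).symm]
    exact (PySem.List.pyGetD_map (fun s => pvCh s k) sequences i "").symm
  have hinner : ∀ (m : Nat),
      ((PySem.List.pyRange ((m : Int) + 1) ((sequences.length : Int)) 1).map (fun j =>
        pvF (pvCh (PySem.List.pyGetD sequences (m : Int) "") k)
            (pvCh (PySem.List.pyGetD sequences j "") k))).sum
      = (((pvCol sequences k).drop (m + 1)).map (pvF ((pvCol sequences k).getD m ' '))).sum := by
    intro m
    have h1 : (PySem.List.pyRange ((m : Int) + 1) ((sequences.length : Int)) 1).map (fun j =>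
        pvF (pvCh (PySem.List.pyGetD sequences (m : Int) "") k)
            (pvCh (PySem.List.pyGetD sequences j "") k))
        = ((PySem.List.pyRange ((m : Int) + 1) (PySem.List.len (pvCol sequences k)) 1).map
            (fun j => PySem.List.pyGetD (pvCol sequences k) j ' ')).map
              (pvF ((pvCol sequences k).getD m ' ')) := by
      rw [List.map_map]
      rw [show PySem.List.len (pvCol sequences k) = (sequences.length : Int) from by
        simp [PySem.List.len, hlen]]
      apply List.map_congr_left
      intro j hj
      simp only [Function.comp, hch]
      simp only [PySem.List.pyGetD_natCast]
    rw [h1, PySem.List.map_pyGetD_pyRange _ _ (by positivity)]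
    rw [show ((m : Int) + 1).toNat = m + 1 from by omega]
  rw [PySem.List.pyRange_one]
  rw [List.map_map]
  rw [show (((sequences.length : Int) - 1 - 0).toNat) = sequences.length - 1 from by omega]
  rw [show ((fun i =>
      ((PySem.List.pyRange (i + 1) (sequences.length : Int) 1).map (fun j =>
        pvF (pvCh (PySem.List.pyGetD sequences i "") k)
            (pvCh (PySem.List.pyGetD sequences j "") k))).sum) ∘ (fun (m : Nat) => (0 : Int) + (m : Int)))
      = fun (m : Nat) => (((pvCol sequences k).drop (m + 1)).map
          (pvF ((pvCol sequences k).getD m ' '))).sum from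
    funext (fun m => by rw [Function.comp]; simp only [zero_add]; exact hinner m)]
  -- extend range (n-1) to range n: the last term is zero
  have hsplit : (List.range (pvCol sequences k).length).map
      (fun m => (((pvCol sequences k).drop (m + 1)).map
        (pvF ((pvCol sequences k).getD m ' '))).sum)
      = (List.range (sequences.length - 1)).map
          (fun m => (((pvCol sequences k).drop (m + 1)).map
            (pvF ((pvCol sequences k).getD m ' '))).sum) ++
        [(((pvCol sequences k).drop ((sequences.length - 1) + 1)).map
            (pvF ((pvCol sequences k).getD (sequences.length - 1) ' '))).sum] := by
    rw [hlen, show sequences.length = (sequences.length - 1) + 1 from by omega,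
        List.range_succ]
    simp
  rw [← pv_sum_drop_pairSum (pvCol sequences k), hsplit]
  rw [List.sum_append]
  rw [show (sequences.length - 1) + 1 = sequences.length from by omega]
  rw [show (pvCol sequences k).drop sequences.length = [] from by
    apply List.drop_eq_nil_of_le; omega]
  simp

-- A's if-chain is an additive step of pvF
theorem pv_step_eq (sv : Int) (a b : Char) :
    (if a = '-' ∧ b = '-' then sv + 0
     else if a = '-' ∨ b = '-' then sv + (-2)
     else if a = b then sv + 3 else sv + (-1)) = sv + pvF a b := by
  unfold pvF; split_ifs <;> rfl

-- fold the character-read expression into pvCh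
theorem pvCh_def (s : String) (k : Int) : (PySem.Str.pyGet? s k).getD ' ' = pvCh s k := rfl

-- sums over two independent lists commute
theorem pv_sum_comm {α β : Type} (l1 : List α) (l2 : List β) (g : α → β → Int) :
    (l1.map (fun x => (l2.map (fun y => g x y)).sum)).sum
      = (l2.map (fun y => (l1.map (fun x => g x y)).sum)).sum := by
  induction l1 with
  | nil => simp
  | cons a t ih => simp [ih, PySem.List.sum_map_add_int]

-- B's per-column body adds pvPairSum of the column
theorem pv_B_body (sequences : List String) (k total : Int) :
    (sequences.foldl
      (fun (st : PySem.Dict Char Int × Int × Int × Int) s =>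
        let c := (PySem.Str.pyGet? s k).getD ' '
        if c = '-' then (st.1, st.2.1 + 1, st.2.2.1, st.2.2.2 + (-2) * st.2.2.1)
        else
          let v := st.1.getD c 0
          (st.1.insert c (v + 1), st.2.1, st.2.2.1 + 1,
           st.2.2.2 + (-2) * st.2.1 + 3 * v - (st.2.2.1 - v)))
      (PySem.Dict.empty, 0, 0, total)).2.2.2 = total + pvPairSum (pvCol sequences k) := by
  have hb := pv_bfold (pvCol sequences k) [] PySem.Dict.empty 0 0 total
    (by intro c hc; simp) (by simp) (by simp)
  rw [pvT_eq, pv_cross_nil, zero_add] at hb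
  rw [← hb]
  unfold pvCol
  rw [List.foldl_map]
  rfl

-- the two ports agree on every input
theorem pv_main (sequences : List String) : score sequences = score_alt sequences := by
  by_cases h2 : sequences.length < 2
  · unfold score score_alt
    rw [if_pos h2]
    rw [PySem.List.pyRange_one_eq_nil (by omega : (sequences.length : Int) - 1 ≤ 0)]
    rfl
  · push_neg at h2
    unfold score score_alt
    rw [if_neg (by omega)]
    -- B side: one addition of pvPairSum per column
    rw [show (fun (total k : Int) =>
        (sequences.foldl
          (fun (st : PySem.Dict Char Int × Int × Int × Int) s =>
            let c := (PySem.Str.pyGet? s k).getD ' '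
            if c = '-' then (st.1, st.2.1 + 1, st.2.2.1, st.2.2.2 + (-2) * st.2.2.1)
            else
              let v := st.1.getD c 0
              (st.1.insert c (v + 1), st.2.1, st.2.2.1 + 1,
               st.2.2.2 + (-2) * st.2.1 + 3 * v - (st.2.2.1 - v)))
          (PySem.Dict.empty, 0, 0, total)).2.2.2)
        = fun (total k : Int) => total + pvPairSum (pvCol sequences k) from
      funext (fun total => funext (fun k => pv_B_body sequences k total))]
    -- A side: turn the if-chain into additive steps of pvF
    simp only [pv_step_eq]
    simp only [pvCh_def]
    -- all folds become sums
    simp only [PySem.List.foldl_add]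
    -- swap the column sum outside the pair sums
    rw [show ((PySem.List.pyRange 0 ((sequences.length : Int) - 1) 1).map (fun i =>
        ((PySem.List.pyRange (i + 1) (sequences.length : Int) 1).map (fun j =>
          ((PySem.List.pyRange 0 (PySem.Str.len (PySem.List.pyGetD sequences 0 "")) 1).map
            (fun k => pvF (pvCh (PySem.List.pyGetD sequences i "") k)
                          (pvCh (PySem.List.pyGetD sequences j "") k))).sum)).sum))
      = ((PySem.List.pyRange 0 ((sequences.length : Int) - 1) 1).map (fun i =>
        ((PySem.List.pyRange 0 (PySem.Str.len (PySem.List.pyGetD sequences 0 "")) 1).map (fun k =>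
          ((PySem.List.pyRange (i + 1) (sequences.length : Int) 1).map
            (fun j => pvF (pvCh (PySem.List.pyGetD sequences i "") k)
                          (pvCh (PySem.List.pyGetD sequences j "") k))).sum)).sum)) from
      List.map_congr_left (fun i _ => pv_sum_comm _ _ _)]
    rw [pv_sum_comm]
    congr 1
    refine congrArg (fun l => List.sum (l : List Int)) (List.map_congr_left ?_)
    intro k _
    exact pv_colA sequences k h2

-- ===== VERDICT (by name: the statement is the Claim_ definition above) =====
theorem score_spec : Claim_equal_score := by
  intro sequences _ _
  unfold Spec_score
  exact pv_main sequences
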